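-- pv_equiv track=rewrite | github.com/alexturek/euler | euler042.py | find_triangle_words
-- ===== SOURCE A (Python) =====
-- def triangle_number(n):
-- 	return (n * (n + 1)) >> 1
--
-- def make_lettermap():
-- 	ret = {}
-- 	val = 1
-- 	for letter in 'abcdefghijklmnopqrstuvwxyz':
-- 		ret[letter] = val
-- 		val += 1
-- 	return ret
--
-- def word_value(word, lettermap):
-- 	value = 0
-- 	for letter in word:
-- 		value += lettermap[letter.lower()]
-- 	return value
--
-- def find_triangle_words(words):
-- 	lettermap = make_lettermap()
-- 	trianglemax = 0
-- 	triangles = set()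
-- 	total = 0
-- 	for word in words:
-- 		val = word_value(word, lettermap)
-- 		while trianglemax < val:
-- 			trianglemax = triangle_number(len(triangles))
-- 			triangles.add(trianglemax)
-- 		if val in triangles:
-- 			total += 1
-- 	return total
-- ===== SOURCE B (Python) =====
-- def find_triangle_words(words):
-- 	alphabet = 'abcdefghijklmnopqrstuvwxyz'
-- 	count = 0
-- 	for word in words:
-- 		v = sum(alphabet.index(ch.lower()) + 1 for ch in word)
-- 		if any(n * (n + 1) == 2 * v for n in range(1, v + 1)):
-- 			count += 1
-- 	return count
-- ===== Notes on version B (the rewrite author's own statement) =====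
-- stated objective: simpler
-- what changed: B drops A's incrementally grown shared set of triangle numbers (and its letter-value dict, replaced by alphabet.index) and instead tests each word's letter sum v directly for triangularity by searching n with n*(n+1) == 2*v, in one pass with no shared state.
-- intended difference: On lists where an empty word appears after some nonempty word, A counts the empty word (its value 0 is in A's triangle set only as a leftover of growing it for an earlier word), while B never counts empty words; not counting a valueless word is the intended behaviour and A itself does not count an empty word that comes first. — e.g. on find_triangle_words(["a", ""]): A returns 2, B returns 1
import Mathlib
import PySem

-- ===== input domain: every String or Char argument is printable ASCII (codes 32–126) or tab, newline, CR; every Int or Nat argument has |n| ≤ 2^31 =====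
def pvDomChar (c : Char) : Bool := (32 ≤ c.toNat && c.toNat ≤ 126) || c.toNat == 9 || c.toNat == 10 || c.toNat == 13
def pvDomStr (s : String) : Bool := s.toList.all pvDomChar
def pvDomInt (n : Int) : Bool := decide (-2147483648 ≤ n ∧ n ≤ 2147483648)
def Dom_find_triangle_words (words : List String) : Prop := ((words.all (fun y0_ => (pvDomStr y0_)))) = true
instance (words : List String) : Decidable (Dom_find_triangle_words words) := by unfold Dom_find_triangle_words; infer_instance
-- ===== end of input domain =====

-- B replaces A's incrementally grown global set of triangle numbers (with its stale-max quirk)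
-- by a direct per-word triangularity test; equivalence is about the return value only.

-- ===== PORT A =====
def triangle_number (n : Int) : Int := (n * (n + 1)) >>> (1 : Nat)  -- Python's '>> 1' is Lean's '>>> (1 : Nat)' on Int

def make_lettermap : PySem.Dict Char Int :=
  (("abcdefghijklmnopqrstuvwxyz".toList).foldl
    (fun (st : PySem.Dict Char Int × Int) letter => (st.1.insert letter st.2, st.2 + 1))
    (PySem.Dict.empty, 1)).1

-- Python raises KeyError on a letter outside the map; Pre_ excludes those inputs, the default 0 is never used there.
def word_value (word : String) (lettermap : PySem.Dict Char Int) : Int :=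
  word.toList.foldl (fun value letter => value + lettermap.getD (PySem.Chars.lowerChar letter) 0) 0

-- the 'while trianglemax < val' loop; fuel val.toNat + 2 is enough (the triangle numbers grow past val)
def growTri (fuel : Nat) (val m : Int) (s : PySem.Set Int) : Int × PySem.Set Int :=
  match fuel with
  | 0 => (m, s)
  | f + 1 =>
    if m < val then
      let m' := triangle_number (PySem.Set.len s)
      growTri f val m' (PySem.Set.add s m')
    else (m, s)

def find_triangle_words (words : List String) : Int :=
  let lettermap := make_lettermap
  (words.foldl
    (fun (st : Int × PySem.Set Int × Int) word =>
      let val := word_value word lettermap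
      let ms := growTri (val.toNat + 2) val st.1 st.2.1
      (ms.1, ms.2, if PySem.Set.contains ms.2 val then st.2.2 + 1 else st.2.2))
    (0, PySem.Set.empty, 0)).2.2

-- ===== PORT B =====
-- Python's str.index raises ValueError where the letter is missing; Pre_ excludes those
-- inputs, so PySem.Chars.find (-1 if absent) is exact here.
def wordVal (word : String) : Int :=
  (word.toList.map (fun ch =>
    PySem.Chars.find "abcdefghijklmnopqrstuvwxyz".toList [PySem.Chars.lowerChar ch] + 1)).sum

def isTriVal (v : Int) : Bool :=
  (PySem.List.pyRange 1 (v + 1) 1).any (fun n => n * (n + 1) == 2 * v)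

def find_triangle_words_alt (words : List String) : Int :=
  words.foldl (fun count word => if isTriVal (wordVal word) then count + 1 else count) 0

-- ===== PRECONDITION & SPEC =====
-- Pre_ excludes exactly the inputs on which Python A raises KeyError: a word with a
-- character that is not an ASCII letter (its lowercase form is missing from the letter map).
def Pre_find_triangle_words (words : List String) : Prop :=
  (words.all (fun w => w.toList.all (fun c =>
    'a' ≤ PySem.Chars.lowerChar c && PySem.Chars.lowerChar c ≤ 'z'))) = true
instance (words : List String) : Decidable (Pre_find_triangle_words words) := by
  unfold Pre_find_triangle_words; infer_instance

def pvWitness_find_triangle_words : List String := ["Sky", "abc", ""]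

-- A counts an empty word (letter value 0) exactly when some earlier word is nonempty, because 0
-- entered its triangle set as a side effect; B never counts an empty word (0 is not a positive
-- triangle number), which is the intended reading. D_: some empty word follows a nonempty word.
def D_find_triangle_words (words : List String) : Prop :=
  ∃ i < words.length, ∃ j < words.length,
    j < i ∧ words.getD j "" ≠ "" ∧ words.getD i "" = ""
instance (words : List String) : Decidable (D_find_triangle_words words) := by
  unfold D_find_triangle_words; infer_instance

def Spec_find_triangle_words (words : List String) (out : Int) : Prop :=
  ¬ D_find_triangle_words words → out = find_triangle_words_alt words
instance (words : List String) (out : Int) : Decidable (Spec_find_triangle_words words out) := by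
  unfold Spec_find_triangle_words; infer_instance

def pvDiffWitness_find_triangle_words : List String := ["a", ""]
def pvDiffWitnessOut_find_triangle_words : Int × Int := (2, 1)

-- ===== CLAIM (what is proved, stated in full; the proofs are below) =====
def Claim_unchanged_find_triangle_words : Prop := ∀ (words : List String), Dom_find_triangle_words words → Pre_find_triangle_words words → Spec_find_triangle_words words (find_triangle_words words)
def Claim_changed_find_triangle_words : Prop := Dom_find_triangle_words (pvDiffWitness_find_triangle_words) ∧ Pre_find_triangle_words (pvDiffWitness_find_triangle_words) ∧ D_find_triangle_words (pvDiffWitness_find_triangle_words) ∧ find_triangle_words (pvDiffWitness_find_triangle_words) = pvDiffWitnessOut_find_triangle_words.1 ∧ find_triangle_words_alt (pvDiffWitness_find_triangle_words) = pvDiffWitnessOut_find_triangle_words.2 ∧ pvDiffWitnessOut_find_triangle_words.1 ≠ pvDiffWitnessOut_find_triangle_words.2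
def Claim_exact_find_triangle_words : Prop := ∀ (words : List String), Dom_find_triangle_words words → Pre_find_triangle_words words → D_find_triangle_words words → find_triangle_words words ≠ find_triangle_words_alt words

-- ===== LEMMAS AND PROOFS =====

-- triangle numbers on the Nat index
def triN (k : Nat) : Int := ((k * (k + 1) / 2 : Nat) : Int)
def triS (k : Nat) : List Int := (List.range k).map triN
def mval (k : Nat) : Int := if k = 0 then 0 else triN (k - 1)

-- the count of empty words A counts in excess (seen = a nonempty word has occurred)
def extraI : List String → Bool → Int
  | [], _ => 0
  | w :: ws, seen =>
      (if w.toList.isEmpty && seen then 1 else 0) + extraI ws (seen || !w.toList.isEmpty)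

def Dgen (ws : List String) (seen : Bool) : Prop :=
  ∃ i < ws.length, ws.getD i "" = "" ∧ (seen = true ∨ ∃ j < i, ws.getD j "" ≠ "")

theorem two_triN (k : Nat) : 2 * triN k = (k : Int) * ((k : Int) + 1) := by
  unfold triN
  have h2 : 2 ∣ k * (k + 1) := (Nat.even_mul_succ_self k).two_dvd
  have h : 2 * (k * (k + 1) / 2) = k * (k + 1) := Nat.mul_div_cancel' h2
  calc 2 * ((k * (k + 1) / 2 : Nat) : Int) = ((2 * (k * (k + 1) / 2) : Nat) : Int) := by
        push_cast; ring
    _ = ((k * (k + 1) : Nat) : Int) := by rw [h]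
    _ = (k : Int) * ((k : Int) + 1) := by push_cast; ring

theorem triN_nonneg (k : Nat) : 0 ≤ triN k := by
  unfold triN; exact_mod_cast Nat.zero_le _

theorem le_triN (k : Nat) : (k : Int) ≤ triN k := by
  have h : k ≤ k * (k + 1) / 2 := by
    rw [Nat.le_div_iff_mul_le (by norm_num : 0 < 2)]
    rcases Nat.eq_zero_or_pos k with hk | hk
    · simp [hk]
    · exact Nat.mul_le_mul_left k (by omega)
  unfold triN
  exact_mod_cast h

theorem triN_lt_triN {i j : Nat} (h : i < j) : triN i < triN j := by
  have hij : (i : Int) < (j : Int) := by exact_mod_cast h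
  have hi : (0:Int) ≤ (i : Int) := Int.natCast_nonneg i
  have hid : ((j:Int) - i) * ((j:Int) + i + 1) = (j:Int) * (j + 1) - (i:Int) * (i + 1) := by ring
  have hpos : (0:Int) < ((j:Int) - i) * ((j:Int) + i + 1) :=
    mul_pos (by linarith) (by linarith)
  have hti := two_triN i
  have htj := two_triN j
  linarith

theorem mval_nonneg (k : Nat) : 0 ≤ mval k := by
  unfold mval; split <;> simp [triN_nonneg]

theorem mem_triS {k : Nat} {v : Int} : v ∈ triS k ↔ ∃ i < k, triN i = v := by
  simp [triS, List.mem_map, List.mem_range]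

theorem contains_triS (k : Nat) (v : Int) :
    PySem.Set.contains (triS k) v = decide (∃ i < k, triN i = v) := by
  simp [PySem.Set.contains, List.contains_eq_mem, mem_triS]

theorem add_triS (k : Nat) : PySem.Set.add (triS k) (triN k) = triS (k + 1) := by
  simp [PySem.Set.add, PySem.Set.contains, List.contains_eq_mem, triS, List.range_succ]
  intro i hik
  exact ne_of_lt (triN_lt_triN hik)

theorem len_triS (k : Nat) : PySem.Set.len (triS k) = (k : Int) := by
  simp [PySem.Set.len, triS]

theorem triangle_number_natCast (k : Nat) : triangle_number ((k : Nat) : Int) = triN k := by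
  unfold triangle_number triN
  have h1 : (k : Int) * ((k : Int) + 1) = ((k * (k + 1) : Nat) : Int) := by push_cast; ring
  rw [h1]
  have h2 : ((k * (k + 1) : Nat) : Int) >>> (1:Nat) = (((k * (k + 1)) / 2 : Nat) : Int) := by
    simp [Int.shiftRight_eq_div_pow]
  exact h2

theorem mval_succ (k : Nat) : mval (k + 1) = triN k := by
  simp [mval]

theorem grow_ok : ∀ (fuel k : Nat) (val : Int), 0 ≤ val → val.toNat < fuel + k →
    ∃ k', k ≤ k' ∧ growTri fuel val (mval k) (triS k) = (mval k', triS k') ∧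
      val ≤ mval k' ∧ (k' = k ∨ (0 < k' ∧ mval k < val)) := by
  intro fuel
  induction fuel with
  | zero =>
    intro k val hv hb
    refine ⟨k, le_refl k, rfl, ?_, Or.inl rfl⟩
    have hk : val.toNat < k := by simpa using hb
    have hm : mval k = triN (k - 1) := by unfold mval; rw [if_neg (by omega)]
    rw [hm]
    have h1 := le_triN (k - 1)
    have h2 : (val.toNat : Int) ≤ ((k - 1 : Nat) : Int) := by
      have : val.toNat ≤ k - 1 := by omega
      exact_mod_cast this
    have h3 : val ≤ (val.toNat : Int) := Int.self_le_toNat val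
    linarith
  | succ f ih =>
    intro k val hv hb
    by_cases hlt : mval k < val
    · have hm' : triangle_number (PySem.Set.len (triS k)) = triN k := by
        rw [len_triS]; exact triangle_number_natCast k
      have hstep : growTri (f + 1) val (mval k) (triS k)
          = growTri f val (mval (k + 1)) (triS (k + 1)) := by
        simp only [growTri, if_pos hlt, hm', add_triS, mval_succ]
      rw [hstep]
      obtain ⟨k', h1, h2, h3, h4⟩ := ih (k + 1) val hv (by omega)
      exact ⟨k', by omega, h2, h3, Or.inr ⟨by omega, hlt⟩⟩
    · refine ⟨k, le_refl k, ?_, by omega, Or.inl rfl⟩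
      simp only [growTri, if_neg hlt]

theorem isTriVal_zero : isTriVal 0 = false := rfl

theorem isTriVal_iff (v : Int) (hv : 0 < v) : isTriVal v = true ↔ ∃ k : Nat, triN k = v := by
  unfold isTriVal
  rw [List.any_eq_true]
  constructor
  · rintro ⟨n, hn, he⟩
    rw [PySem.List.mem_pyRange_one] at hn
    rw [beq_iff_eq] at he
    refine ⟨n.toNat, ?_⟩
    have hcast : ((n.toNat : Int)) = n := Int.toNat_of_nonneg (by omega)
    have h2 := two_triN n.toNat
    rw [hcast] at h2
    linarith
  · rintro ⟨k, hk⟩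
    refine ⟨(k : Int), ?_, ?_⟩
    · rw [PySem.List.mem_pyRange_one]
      have hk0 : k ≠ 0 := by
        rintro rfl
        simp [triN] at hk
        omega
      constructor
      · exact_mod_cast Nat.one_le_iff_ne_zero.mpr hk0
      · have := le_triN k
        omega
    · rw [beq_iff_eq]
      have := two_triN k
      rw [hk] at this
      linarith

theorem contains_triS_pos (k' : Nat) (val : Int) (h0 : 0 < val) (hle : val ≤ mval k') :
    PySem.Set.contains (triS k') val = isTriVal val := by
  rw [contains_triS]
  by_cases ht : isTriVal val = true
  · rw [ht]
    rw [isTriVal_iff val h0] at ht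
    obtain ⟨i, hi⟩ := ht
    have hk0 : k' ≠ 0 := by
      rintro rfl
      simp [mval] at hle
      omega
    have hmv : mval k' = triN (k' - 1) := by unfold mval; rw [if_neg hk0]
    have hik : i < k' := by
      by_contra hge
      have hlt : k' - 1 < i := by omega
      have := triN_lt_triN hlt
      rw [hi, ← hmv] at this
      omega
    simp only [decide_eq_true_eq]
    exact ⟨i, hik, hi⟩
  · rw [Bool.not_eq_true] at ht
    rw [ht]
    simp only [decide_eq_false_iff_not]
    rintro ⟨i, hik, hi⟩
    exact absurd ((isTriVal_iff val h0).mpr ⟨i, hi⟩) (by simp [ht])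

theorem contains_triS_zero (k' : Nat) :
    PySem.Set.contains (triS k') 0 = decide (0 < k') := by
  rw [contains_triS]
  rcases Nat.eq_zero_or_pos k' with h | h
  · subst h; simp
  · simp only [decide_eq_decide]
    constructor
    · intro _; exact h
    · intro _
      refine ⟨0, h, ?_⟩
      simp [triN]

set_option maxRecDepth 4000 in
theorem getD_lettermap (c : Char) (h1 : 'a' ≤ c) (h2 : c ≤ 'z') :
    make_lettermap.getD c 0 = (c.toNat : Int) - 96 := by
  have h1' : 97 ≤ c.toNat := h1
  have h2' : c.toNat ≤ 122 := h2
  have hc := (Char.ofNat_toNat c).symm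
  interval_cases h : c.toNat <;> rw [hc] <;> decide

-- per-word: A's letter-map sum equals B's arithmetic sum, and it is ≥ the word length
theorem wv_list (cs : List Char) :
    (∀ c ∈ cs, 'a' ≤ PySem.Chars.lowerChar c ∧ PySem.Chars.lowerChar c ≤ 'z') →
    ∀ acc : Int,
      cs.foldl (fun value letter => value + make_lettermap.getD (PySem.Chars.lowerChar letter) 0) acc
        = acc + (cs.map (fun ch => ((PySem.Chars.lowerChar ch).toNat : Int) - 96)).sum := by
  induction cs with
  | nil => intro _ acc; simp
  | cons c cs ih =>
    intro h acc
    have hc := h c (List.mem_cons_self ..)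
    have ht := fun x hx => h x (List.mem_cons_of_mem _ hx)
    simp only [List.foldl_cons, List.map_cons, List.sum_cons]
    rw [ih ht, getD_lettermap _ hc.1 hc.2]
    ring

set_option maxRecDepth 4000 in
theorem find_alpha (c : Char) (h1 : 'a' ≤ c) (h2 : c ≤ 'z') :
    PySem.Chars.find "abcdefghijklmnopqrstuvwxyz".toList [c] = (c.toNat : Int) - 97 := by
  have h1' : 97 ≤ c.toNat := h1
  have h2' : c.toNat ≤ 122 := h2
  have hc := (Char.ofNat_toNat c).symm
  interval_cases h : c.toNat <;> rw [hc] <;> decide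

theorem wordVal_eq_g (word : String)
    (h : ∀ c ∈ word.toList, 'a' ≤ PySem.Chars.lowerChar c ∧ PySem.Chars.lowerChar c ≤ 'z') :
    wordVal word
      = (word.toList.map (fun ch => ((PySem.Chars.lowerChar ch).toNat : Int) - 96)).sum := by
  unfold wordVal
  congr 1
  apply List.map_congr_left
  intro c hc
  rw [find_alpha _ (h c hc).1 (h c hc).2]
  ring

theorem word_value_eq (word : String)
    (h : ∀ c ∈ word.toList, 'a' ≤ PySem.Chars.lowerChar c ∧ PySem.Chars.lowerChar c ≤ 'z') :
    word_value word make_lettermap = wordVal word := by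
  unfold word_value
  rw [wv_list word.toList h 0, wordVal_eq_g word h]
  ring

theorem sum_ge_len (cs : List Char) :
    (∀ c ∈ cs, 'a' ≤ PySem.Chars.lowerChar c ∧ PySem.Chars.lowerChar c ≤ 'z') →
    (cs.length : Int) ≤ (cs.map (fun ch => ((PySem.Chars.lowerChar ch).toNat : Int) - 96)).sum := by
  induction cs with
  | nil => intro _; simp
  | cons c cs ih =>
    intro h
    have hc := h c (List.mem_cons_self ..)
    have h1 : (97 : Int) ≤ ((PySem.Chars.lowerChar c).toNat : Int) := by exact_mod_cast hc.1
    have ht := ih (fun x hx => h x (List.mem_cons_of_mem _ hx))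
    simp only [List.map_cons, List.sum_cons, List.length_cons]
    push_cast
    linarith

theorem wordVal_ge_len (word : String)
    (h : ∀ c ∈ word.toList, 'a' ≤ PySem.Chars.lowerChar c ∧ PySem.Chars.lowerChar c ≤ 'z') :
    (word.toList.length : Int) ≤ wordVal word := by
  rw [wordVal_eq_g word h]
  exact sum_ge_len word.toList h

theorem wordVal_nonneg (word : String)
    (h : ∀ c ∈ word.toList, 'a' ≤ PySem.Chars.lowerChar c ∧ PySem.Chars.lowerChar c ≤ 'z') :
    0 ≤ wordVal word := le_trans (by positivity) (wordVal_ge_len word h)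

theorem wordVal_empty (word : String) (hw : word.toList = []) : wordVal word = 0 := by
  simp [wordVal, hw]

theorem wordVal_pos (word : String) (hw : word.toList ≠ [])
    (h : ∀ c ∈ word.toList, 'a' ≤ PySem.Chars.lowerChar c ∧ PySem.Chars.lowerChar c ≤ 'z') :
    0 < wordVal word := by
  have h1 := wordVal_ge_len word h
  have h2 : 0 < word.toList.length := List.length_pos_of_ne_nil hw
  have h3 : (1 : Int) ≤ (word.toList.length : Int) := by exact_mod_cast h2
  linarith

theorem bshift (ws : List String) :
    ∀ c : Int,
    ws.foldl (fun count word => if isTriVal (wordVal word) then count + 1 else count) c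
      = c + ws.foldl (fun count word => if isTriVal (wordVal word) then count + 1 else count) 0 := by
  induction ws with
  | nil => intro c; simp
  | cons w ws ih =>
    intro c
    simp only [List.foldl_cons]
    rw [ih, ih (if isTriVal (wordVal w) then (0:Int) + 1 else (0:Int))]
    split_ifs <;> ring

theorem main_loop (ws : List String) :
    (ws.all fun w => w.toList.all fun c =>
        'a' ≤ PySem.Chars.lowerChar c && PySem.Chars.lowerChar c ≤ 'z') = true →
    ∀ (k : Nat) (t : Int),
    (ws.foldl
      (fun (st : Int × PySem.Set Int × Int) word =>
        let val := word_value word make_lettermap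
        let ms := growTri (val.toNat + 2) val st.1 st.2.1
        (ms.1, ms.2, if PySem.Set.contains ms.2 val then st.2.2 + 1 else st.2.2))
      (mval k, triS k, t)).2.2
      = t + ws.foldl (fun count word => if isTriVal (wordVal word) then count + 1 else count) 0
          + extraI ws (decide (0 < k)) := by
  induction ws with
  | nil => intro _ k t; simp [extraI]
  | cons w ws ih =>
    intro hall k t
    rw [List.all_cons, Bool.and_eq_true] at hall
    obtain ⟨hw, hws⟩ := hall
    have hwP : ∀ c ∈ w.toList, 'a' ≤ PySem.Chars.lowerChar c ∧ PySem.Chars.lowerChar c ≤ 'z' := by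
      intro c hc
      have := (List.all_eq_true.mp hw) c hc
      simpa using this
    have hv : word_value w make_lettermap = wordVal w := word_value_eq w hwP
    have hv0 : 0 ≤ wordVal w := wordVal_nonneg w hwP
    simp only [List.foldl_cons, extraI]
    rw [hv]
    obtain ⟨k', hk, heq, hle, hdisj⟩ :=
      grow_ok ((wordVal w).toNat + 2) k (wordVal w) hv0 (by omega)
    rw [heq]
    rw [ih hws k' (if PySem.Set.contains (triS k') (wordVal w) = true then t + 1 else t)]
    rw [bshift ws (if isTriVal (wordVal w) = true then (0:Int) + 1 else 0)]
    by_cases hw0 : w.toList = []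
    · have hz : wordVal w = 0 := wordVal_empty w hw0
      have hkk : k' = k := by
        rcases hdisj with h | ⟨_, h⟩
        · exact h
        · have := mval_nonneg k; omega
      subst hkk
      rw [hz]
      rw [contains_triS_zero]
      have hEmp : w.toList.isEmpty = true := by simp [hw0]
      rw [hEmp, isTriVal_zero]
      simp only [Bool.true_and, Bool.or_false, Bool.not_true]
      by_cases hkpos : 0 < k'
      · simp [hkpos]; omega
      · simp [hkpos]
    · have hpos : 0 < wordVal w := wordVal_pos w hw0 hwP
      have hk'pos : 0 < k' := by
        rcases hdisj with h | ⟨h, _⟩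
        · subst h
          by_contra hc
          have : k' = 0 := by omega
          rw [this] at hle
          simp [mval] at hle
          omega
        · exact h
      rw [contains_triS_pos k' (wordVal w) hpos hle]
      have hEmp : w.toList.isEmpty = false := by simp [hw0]
      rw [hEmp]
      simp only [Bool.not_false, Bool.or_true]
      have h1 : decide (0 < k') = true := by simpa using hk'pos
      rw [h1]
      by_cases htri : isTriVal (wordVal w) = true
      · simp [htri]; omega
      · simp [htri]

theorem extraI_nonneg (ws : List String) : ∀ seen : Bool, 0 ≤ extraI ws seen := by
  induction ws with
  | nil => intro seen; simp [extraI]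
  | cons w ws ih =>
    intro seen
    have := ih (seen || !w.toList.isEmpty)
    unfold extraI
    split <;> omega

theorem empty_iff_toList (w : String) : w.toList.isEmpty = true ↔ w = "" := by
  rw [List.isEmpty_iff, String.toList_eq_nil_iff]

theorem Dgen_cons (w : String) (ws : List String) (seen : Bool) :
    Dgen (w :: ws) seen ↔ (w = "" ∧ seen = true) ∨ Dgen ws (seen || !w.toList.isEmpty) := by
  constructor
  · rintro ⟨i, hi, he, hc⟩
    cases i with
    | zero =>
      left
      refine ⟨by simpa using he, ?_⟩
      rcases hc with h | ⟨j, hj, _⟩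
      · exact h
      · omega
    | succ i' =>
      right
      refine ⟨i', by simpa using hi, by simpa using he, ?_⟩
      rcases hc with h | ⟨j, hj, hne⟩
      · left; simp [h]
      · cases j with
        | zero =>
          left
          have : ¬ w.toList.isEmpty = true := fun h => hne (by simpa using (empty_iff_toList w).mp h)
          simp [this]
        | succ j' =>
          right
          exact ⟨j', by omega, by simpa using hne⟩
  · rintro (⟨hw, hs⟩ | ⟨i, hi, he, hc⟩)
    · exact ⟨0, by simp, by simpa using hw, Or.inl hs⟩
    · refine ⟨i + 1, by simpa using hi, by simpa using he, ?_⟩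
      rcases hc with h | ⟨j, hj, hne⟩
      · rcases Bool.or_eq_true_iff.mp h with h' | h'
        · exact Or.inl h'
        · refine Or.inr ⟨0, by omega, ?_⟩
          have : ¬ w.toList.isEmpty = true := by simpa using h'
          simpa using fun hw => this ((empty_iff_toList w).mpr hw)
      · exact Or.inr ⟨j + 1, by omega, by simpa using hne⟩

theorem extraI_zero_of_not (ws : List String) : ∀ seen : Bool, ¬ Dgen ws seen →
    extraI ws seen = 0 := by
  induction ws with
  | nil => intro seen _; rfl
  | cons w ws ih =>
    intro seen h
    rw [Dgen_cons] at h
    have h12 := not_or.mp h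
    unfold extraI
    rw [ih _ h12.2]
    have hcond : ¬ (w.toList.isEmpty && seen) = true := by
      intro hb
      rcases Bool.and_eq_true _ _ |>.mp hb with ⟨h1, h2⟩
      exact h12.1 ⟨(empty_iff_toList w).mp h1, h2⟩
    simp [hcond]

theorem extraI_pos_of (ws : List String) : ∀ seen : Bool, Dgen ws seen →
    0 < extraI ws seen := by
  induction ws with
  | nil => rintro seen ⟨i, hi, _⟩; simp at hi
  | cons w ws ih =>
    intro seen h
    rw [Dgen_cons] at h
    unfold extraI
    rcases h with ⟨hw, hs⟩ | hD
    · have h1 : (w.toList.isEmpty && seen) = true := by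
        simp [hs, (empty_iff_toList w).mpr hw]
      rw [if_pos h1]
      have := extraI_nonneg ws (seen || !w.toList.isEmpty)
      omega
    · have := ih _ hD
      split <;> omega

theorem D_iff_Dgen (ws : List String) : D_find_triangle_words ws ↔ Dgen ws false := by
  unfold D_find_triangle_words Dgen
  constructor
  · rintro ⟨i, hi, j, _, hji, hne, he⟩
    exact ⟨i, hi, he, Or.inr ⟨j, hji, hne⟩⟩
  · rintro ⟨i, hi, he, hc⟩
    rcases hc with h | ⟨j, hji, hne⟩
    · simp at h
    · exact ⟨i, hi, j, by omega, hji, hne, he⟩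

theorem A_eq_B_plus_extra (words : List String)
    (hPre : Pre_find_triangle_words words) :
    find_triangle_words words = find_triangle_words_alt words + extraI words false := by
  have h : find_triangle_words words
      = 0 + find_triangle_words_alt words + extraI words (decide (0 < 0)) :=
    main_loop words hPre 0 0
  simpa using h

theorem pvAux_pre_witness : Pre_find_triangle_words pvDiffWitness_find_triangle_words := by decide

set_option maxRecDepth 40000 in
theorem pvAux_A_witness : find_triangle_words pvDiffWitness_find_triangle_words = 2 := by decide

-- ===== VERDICT (by name: the statement is the Claim_ definitions above) =====
theorem find_triangle_words_spec : Claim_unchanged_find_triangle_words := by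
  intro words _ hPre hND
  have h := A_eq_B_plus_extra words hPre
  rw [extraI_zero_of_not words false (fun hD => hND ((D_iff_Dgen words).mpr hD))] at h
  simpa [Spec_find_triangle_words] using h

theorem find_triangle_words_changed : Claim_changed_find_triangle_words := by
  unfold Claim_changed_find_triangle_words
  refine ⟨by decide, pvAux_pre_witness, by decide, pvAux_A_witness, by decide, by decide⟩

theorem find_triangle_words_tight : Claim_exact_find_triangle_words := by
  intro words _ hPre hD
  have h := A_eq_B_plus_extra words hPre
  have hpos := extraI_pos_of words false ((D_iff_Dgen words).mp hD)
  omega
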